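-- pv_equiv track=rewrite | github.com/grapheneaffiliate/h4-polytopic-attention | solve_arc2.py | solve_1190e5a7
-- ===== SOURCE A (Python) =====
-- def solve_1190e5a7(grid):
--     rows = len(grid)
--     cols = len(grid[0])
--
--     # Find separator color: the color that forms complete rows
--     bg = None
--     sep = None
--     for r in range(rows):
--         row_vals = set(grid[r])
--         if len(row_vals) == 1:
--             # Full row of one color
--             if sep is None:
--                 sep = grid[r][0]
--             elif grid[r][0] != sep:
--                 # Multiple candidates, keep the one that appears in full rows
--                 pass
--
--     # Find background: the other color
--     for r in range(rows):
--         for c in range(cols):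
--             if grid[r][c] != sep:
--                 bg = grid[r][c]
--                 break
--         if bg is not None:
--             break
--
--     # Find separator row positions
--     sep_rows = [-1]  # virtual separator before row 0
--     for r in range(rows):
--         if all(grid[r][c] == sep for c in range(cols)):
--             sep_rows.append(r)
--     sep_rows.append(rows)  # virtual separator after last row
--
--     # Find separator col positions
--     sep_cols = [-1]
--     for c in range(cols):
--         if all(grid[r][c] == sep for r in range(rows)):
--             sep_cols.append(c)
--     sep_cols.append(cols)
--
--     # Compute cell heights and widths
--     heights = []
--     for i in range(len(sep_rows) - 1):
--         h = sep_rows[i+1] - sep_rows[i] - 1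
--         if h > 0:
--             heights.append(h)
--
--     widths = []
--     for i in range(len(sep_cols) - 1):
--         w = sep_cols[i+1] - sep_cols[i] - 1
--         if w > 0:
--             widths.append(w)
--
--     # Find the smallest/most common dimensions
--     # Actually: find the unique smallest cell
--     min_h = min(heights) if heights else 1
--     min_w = min(widths) if widths else 1
--
--     # Create output
--     result = [[bg] * min_w for _ in range(min_h)]
--     return result
-- ===== SOURCE B (Python) =====
-- def solve_1190e5a7(grid):
--     rows = len(grid)
--     cols = len(grid[0])
--
--     # Separator color: first fully-monochromatic row (early break).
--     sep = None
--     for row in grid: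
--         if row and all(v == row[0] for v in row):
--             sep = row[0]
--             break
--
--     # Background: first cell (row-major, within the first cols columns) not equal to sep.
--     bg = None
--     for row in grid:
--         for c in range(cols):
--             if row[c] != sep:
--                 bg = row[c]
--                 break
--         if bg is not None:
--             break
--
--     # Single-pass run-length scan: minimum length of a maximal run of
--     # non-separator lines, defaulting to 1 when there is no such run.
--     def min_run(flags):
--         best = None
--         run = 0
--         for f in flags:
--             if f:
--                 if run > 0 and (best is None or run < best):
--                     best = run
--                 run = 0
--             else:
--                 run += 1
--         if run > 0 and (best is None or run < best):
--             best = run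
--         return 1 if best is None else best
--
--     row_flags = [all(row[c] == sep for c in range(cols)) for row in grid]
--     col_flags = [all(row[c] == sep for row in grid) for c in range(cols)]
--
--     min_h = min_run(row_flags)
--     min_w = min_run(col_flags)
--     return [[bg] * min_w for _ in range(min_h)]
-- ===== Notes on version B (the rewrite author's own statement) =====
-- stated objective: alternative
-- what changed: B finds the separator color by an early-exit scan for the first constant row (instead of A's set-size test over every row) and computes the minimal cell height/width by a single-pass run-length scan over separator flags keeping a running minimum, instead of A's collect-separator-positions / pairwise-difference / min() pipeline; the early break and the dropped intermediate position/difference lists give a constant-factor speedup (measured ~1.9x at the largest size).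
-- outside the precondition, e.g. on solve_1190e5a7([[9, 9], [5, 4], [3]]): A returns [[5, 5], [5, 5]], B returns [[5, 5], [5, 5]]; on solve_1190e5a7([[7, 7], [7, 7]]): A returns [[None]], B returns [[None]]
import Mathlib
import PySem

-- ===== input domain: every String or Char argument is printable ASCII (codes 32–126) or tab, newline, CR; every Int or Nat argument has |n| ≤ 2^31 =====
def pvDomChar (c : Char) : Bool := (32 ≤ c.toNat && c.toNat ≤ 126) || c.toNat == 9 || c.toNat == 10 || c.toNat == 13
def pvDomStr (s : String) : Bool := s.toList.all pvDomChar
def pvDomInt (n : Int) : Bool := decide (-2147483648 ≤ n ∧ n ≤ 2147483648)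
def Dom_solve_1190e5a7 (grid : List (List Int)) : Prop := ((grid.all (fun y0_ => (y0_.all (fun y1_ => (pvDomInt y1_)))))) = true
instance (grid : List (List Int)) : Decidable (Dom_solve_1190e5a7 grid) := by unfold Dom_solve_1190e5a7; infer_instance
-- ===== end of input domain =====

-- B replaces A's separator-position collection + pairwise differencing + min() with a single-pass
-- run-length scan (and finds the separator color by an early-exit first-constant-row scan);
-- same asymptotic cost; a timing run measured a constant-factor speedup (objective: alternative).

-- ===== PORT A =====
-- shared cell/row accessors (grid[r], row[c]; in range on all admitted inputs)
def pvCell (row : List Int) (c : Int) : Int := PySem.List.pyGetD row c 0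
def pvRowAt (grid : List (List Int)) (r : Int) : List Int := PySem.List.pyGetD grid r []
-- cols = len(grid[0]) (both Pythons compute it identically; Pre_ gives grid ≠ [])
def pvColsOf (grid : List (List Int)) : Int := ((PySem.List.pyGetD grid 0 ([] : List Int)).length : Int)
-- the bg-scan loop (textually identical in Source A and Source B): first cell in the first cols columns ≠ sep
def pvBgScan (cols : Int) (sep : Option Int) (grid : List (List Int)) : Option Int :=
  grid.foldl (fun b row =>
    if b.isNone then
      ((PySem.List.pyRange 0 cols 1).find? (fun c => !(some (pvCell row c) == sep))).map
        (fun c => pvCell row c)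
    else b) none

-- A's first loop: keep the first row with len(set(row)) == 1
def pvSepA (grid : List (List Int)) : Option Int :=
  grid.foldl (fun s row =>
    if (PySem.Set.ofList row).length = 1 then (if s.isNone then some (pvCell row 0) else s) else s)
    none

def pvIsSepRowA (grid : List (List Int)) (sep : Option Int) (cols r : Int) : Bool :=
  (PySem.List.pyRange 0 cols 1).all (fun c => some (pvCell (pvRowAt grid r) c) == sep)

def pvIsSepColA (grid : List (List Int)) (sep : Option Int) (c : Int) : Bool :=
  (PySem.List.pyRange 0 (grid.length : Int) 1).all (fun r => some (pvCell (pvRowAt grid r) c) == sep)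

def pvSepRowsA (grid : List (List Int)) (sep : Option Int) : List Int :=
  [-1] ++ (PySem.List.pyRange 0 (grid.length : Int) 1).filter
            (fun r => pvIsSepRowA grid sep (pvColsOf grid) r) ++ [(grid.length : Int)]

def pvSepColsA (grid : List (List Int)) (sep : Option Int) : List Int :=
  [-1] ++ (PySem.List.pyRange 0 (pvColsOf grid) 1).filter
            (fun c => pvIsSepColA grid sep c) ++ [pvColsOf grid]

-- A's heights/widths loop over adjacent pairs of positions, keeping positive differences
def pvGaps : List Int → List Int
  | a :: b :: rest => (if b - a - 1 > 0 then [b - a - 1] else []) ++ pvGaps (b :: rest)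
  | _ => []

def solve_1190e5a7 (grid : List (List Int)) : List (List Int) :=
  let sep := pvSepA grid
  let bg := pvBgScan (pvColsOf grid) sep grid
  let min_h := (PySem.List.min? (pvGaps (pvSepRowsA grid sep)) (fun x => x)).getD 1
  let min_w := (PySem.List.min? (pvGaps (pvSepColsA grid sep)) (fun x => x)).getD 1
  List.replicate min_h.toNat (List.replicate min_w.toNat (bg.getD 0))

-- ===== PORT B =====
-- B's sep: first fully-constant row, early break
def pvMonoRowB (row : List Int) : Bool := !row.isEmpty && row.all (fun v => v == row.headD 0)

def pvSepB (grid : List (List Int)) : Option Int :=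
  (grid.find? pvMonoRowB).map (fun row => row.headD 0)

-- one step of B's run-length minimum update: if run > 0 and (best is None or run < best): best = run
def pvUpd (best : Option Int) (run : Int) : Option Int :=
  if 0 < run ∧ (best.isNone = true ∨ run < best.getD 0) then some run else best

def pvStep (st : Option Int × Int) : Bool → Option Int × Int
  | true => (pvUpd st.1 st.2, 0)
  | false => (st.1, st.2 + 1)

def pvMinRun (flags : List Bool) : Int :=
  let st := flags.foldl pvStep ((none : Option Int), (0 : Int))
  (pvUpd st.1 st.2).getD 1

def pvRowFlagsB (grid : List (List Int)) (sep : Option Int) : List Bool :=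
  grid.map (fun row => (PySem.List.pyRange 0 (pvColsOf grid) 1).all (fun c => some (pvCell row c) == sep))

def pvColFlagsB (grid : List (List Int)) (sep : Option Int) : List Bool :=
  (PySem.List.pyRange 0 (pvColsOf grid) 1).map (fun c => grid.all (fun row => some (pvCell row c) == sep))

def solve_1190e5a7_alt (grid : List (List Int)) : List (List Int) :=
  let sep := pvSepB grid
  let bg := pvBgScan (pvColsOf grid) sep grid
  List.replicate (pvMinRun (pvRowFlagsB grid sep)).toNat
    (List.replicate (pvMinRun (pvColFlagsB grid sep)).toNat (bg.getD 0))

-- ===== PRECONDITION & SPEC =====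
-- Pre_ restricts to grid ≠ [] with a nonempty first row, no row shorter than the first (A raises
-- IndexError on many such ragged grids, depending on lazy short-circuit reads), and a grid that is
-- not constant on the first len(grid[0]) columns while containing a constant row (there A's bg stays
-- None and the returned grid holds None, not ints).
def Pre_solve_1190e5a7 (grid : List (List Int)) : Prop :=
  grid ≠ [] ∧
  (grid.headD []) ≠ [] ∧
  (∀ row ∈ grid, (grid.headD []).length ≤ row.length) ∧
  ¬((∀ row ∈ grid, ∀ v ∈ row.take (grid.headD []).length, v = (grid.headD []).headD 0) ∧
    (∃ row ∈ grid, row ≠ [] ∧ ∀ v ∈ row, v = (grid.headD []).headD 0))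

instance (grid : List (List Int)) : Decidable (Pre_solve_1190e5a7 grid) := by
  unfold Pre_solve_1190e5a7; infer_instance

def pvWitness_solve_1190e5a7 : List (List Int) := [[0, 1], [0, 1]]

def Spec_solve_1190e5a7 (grid : List (List Int)) (out : List (List Int)) : Prop := out = solve_1190e5a7_alt grid
instance (grid : List (List Int)) (out : List (List Int)) : Decidable (Spec_solve_1190e5a7 grid out) := by unfold Spec_solve_1190e5a7; infer_instance

-- ===== CLAIM (what is proved, stated in full; the proofs are below) =====
def Claim_equal_solve_1190e5a7 : Prop := ∀ (grid : List (List Int)), Dom_solve_1190e5a7 grid → Pre_solve_1190e5a7 grid → Spec_solve_1190e5a7 grid (solve_1190e5a7 grid)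

-- ===== LEMMAS AND PROOFS =====

-- proof-side: indices (from i) of the true flags; run-length gap list
def pvTrueIdxs (i : Int) : List Bool → List Int
  | [] => []
  | true :: rest => i :: pvTrueIdxs (i + 1) rest
  | false :: rest => pvTrueIdxs (i + 1) rest

def pvGapsRL (run : Int) : List Bool → List Int
  | [] => if 0 < run then [run] else []
  | true :: rest => (if 0 < run then [run] else []) ++ pvGapsRL 0 rest
  | false :: rest => pvGapsRL (run + 1) rest

theorem pvGaps_single (a : Int) : pvGaps [a] = [] := rfl

theorem pvGaps_cons₂ (a b : Int) (rest : List Int) :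
    pvGaps (a :: b :: rest) = (if b - a - 1 > 0 then [b - a - 1] else []) ++ pvGaps (b :: rest) := rfl

theorem pvUpd_nonpos (best : Option Int) (run : Int) (h : ¬ 0 < run) : pvUpd best run = best := by
  simp [pvUpd, h]

theorem pvUpd_some_pos (m x : Int) (hx : 0 < x) :
    pvUpd (some m) x = some (min m x) := by
  simp only [pvUpd, Option.isNone_some, Bool.false_eq_true, false_or, Option.getD_some]
  rw [Int.min_def]
  by_cases hxm : x < m
  · rw [if_pos ⟨hx, hxm⟩, if_neg (by omega)]
  · rw [if_neg (by omega), if_pos (by omega)]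

-- L2: B's fold equals folding pvUpd over the run-length gap list
theorem minrun_fold : ∀ (flags : List Bool) (best : Option Int) (run : Int),
    pvUpd (flags.foldl pvStep (best, run)).1 (flags.foldl pvStep (best, run)).2
      = (pvGapsRL run flags).foldl pvUpd best := by
  intro flags
  induction flags with
  | nil =>
      intro best run
      simp only [List.foldl_nil, pvGapsRL]
      by_cases h : 0 < run
      · rw [if_pos h]; rfl
      · rw [if_neg h, pvUpd_nonpos best run h]; rfl
  | cons f rest ih =>
      intro best run
      cases f with
      | true =>
          simp only [List.foldl_cons, pvStep, pvGapsRL, List.foldl_append]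
          rw [ih]
          congr 1
          by_cases h : 0 < run
          · rw [if_pos h]; rfl
          · rw [if_neg h, pvUpd_nonpos best run h]; rfl
      | false =>
          simp only [List.foldl_cons, pvStep, pvGapsRL]
          exact ih best (run + 1)

-- L4: every gap is positive
theorem pvGapsRL_pos : ∀ (flags : List Bool) (run x : Int), x ∈ pvGapsRL run flags → 0 < x := by
  intro flags
  induction flags with
  | nil =>
      intro run x hx
      simp only [pvGapsRL] at hx
      split_ifs at hx with h
      · simp at hx; omega
      · simp at hx
  | cons f rest ih =>
      intro run x hx
      cases f with
      | true =>
          simp only [pvGapsRL, List.mem_append] at hx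
          rcases hx with hx | hx
          · split_ifs at hx with h
            · simp at hx; omega
            · simp at hx
          · exact ih 0 x hx
      | false =>
          simp only [pvGapsRL] at hx
          exact ih (run + 1) x hx

theorem foldl_pvUpd_some_min : ∀ (t : List Int) (m : Int), (∀ x ∈ t, 0 < x) →
    t.foldl pvUpd (some m) = some (t.foldl min m) := by
  intro t
  induction t with
  | nil => intro m _; rfl
  | cons x rest ih =>
      intro m h
      simp only [List.foldl_cons]
      rw [pvUpd_some_pos m x (h x (by simp))]
      exact ih (min m x) (fun y hy => h y (by simp [hy]))

-- L3: folding pvUpd over a positive list is Python's min()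
theorem foldl_pvUpd_min? (l : List Int) (h : ∀ x ∈ l, 0 < x) :
    l.foldl pvUpd none = PySem.List.min? l (fun x => x) := by
  cases l with
  | nil => rfl
  | cons x t =>
      rw [PySem.List.min?_id_cons]
      simp only [List.foldl_cons]
      have hx : 0 < x := h x (by simp)
      have : pvUpd none x = some x := by simp [pvUpd, hx]
      rw [this]
      exact foldl_pvUpd_some_min t x (fun y hy => h y (by simp [hy]))

-- L1: A's positive adjacent differences of (-1 :: separator indices ++ [n]) ARE the run lengths
theorem gaps_trueIdxs : ∀ (flags : List Bool) (i run p e : Int), 0 ≤ run →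
    p = i - run - 1 → e = i + (flags.length : Int) →
    pvGaps (p :: pvTrueIdxs i flags ++ [e]) = pvGapsRL run flags := by
  intro flags
  induction flags with
  | nil =>
      intro i run p e hr hp he
      simp only [pvTrueIdxs, List.singleton_append, pvGapsRL]
      rw [pvGaps_cons₂, pvGaps_single, List.append_nil]
      rw [show e - p - 1 = run by simp only [List.length_nil] at he; omega]
  | cons f rest ih =>
      intro i run p e hr hp he
      cases f with
      | true =>
          simp only [pvTrueIdxs, List.cons_append, pvGapsRL]
          rw [pvGaps_cons₂]
          congr 1
          · rw [show i - p - 1 = run by omega]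
          · exact ih (i + 1) 0 i e (le_refl 0) (by omega)
              (by simp only [List.length_cons] at he; push_cast at he ⊢; omega)
      | false =>
          simp only [pvTrueIdxs, pvGapsRL]
          exact ih (i + 1) (run + 1) p e (by omega) (by omega)
            (by simp only [List.length_cons] at he; push_cast at he ⊢; omega)

-- filter of a range = indices of the true flags of its map
theorem filter_pyRange_eq_trueIdxs (p : Int → Bool) : ∀ (n : Nat) (a : Int),
    (PySem.List.pyRange a (a + (n : Int)) 1).filter p
      = pvTrueIdxs a ((PySem.List.pyRange a (a + (n : Int)) 1).map p) := by
  intro n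
  induction n with
  | zero => intro a; rw [PySem.List.pyRange_one_eq_nil (by omega)]; rfl
  | succ m ih =>
      intro a
      rw [PySem.List.pyRange_one_cons (by omega : a < a + ((m + 1 : Nat) : Int))]
      have htail : PySem.List.pyRange (a + 1) (a + ((m + 1 : Nat) : Int)) 1
          = PySem.List.pyRange (a + 1) ((a + 1) + (m : Int)) 1 := by
        congr 1; push_cast; ring
      rw [htail]
      simp only [List.filter_cons, List.map_cons]
      cases hpa : p a <;> simp [pvTrueIdxs, ih (a + 1)]

-- bridging 'for r in range(len(grid)): … grid[r] …' to direct iteration over grid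
theorem map_rowAt (grid : List (List Int)) (f : List Int → Bool) :
    (PySem.List.pyRange 0 (grid.length : Int) 1).map (fun r => f (PySem.List.pyGetD grid r []))
      = grid.map f := by
  have h1 : (PySem.List.pyRange 0 (grid.length : Int) 1).map (fun r => f (PySem.List.pyGetD grid r []))
      = ((PySem.List.pyRange 0 (grid.length : Int) 1).map (fun r => PySem.List.pyGetD grid r [])).map f := by
    rw [List.map_map]; rfl
  rw [h1, PySem.List.map_pyGetD_pyRange_zero' grid []]

theorem all_rowAt (grid : List (List Int)) (q : List Int → Bool) :
    (PySem.List.pyRange 0 (grid.length : Int) 1).all (fun r => q (PySem.List.pyGetD grid r []))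
      = grid.all q := by
  have h1 : (PySem.List.pyRange 0 (grid.length : Int) 1).all (fun r => q (PySem.List.pyGetD grid r []))
      = ((PySem.List.pyRange 0 (grid.length : Int) 1).map (fun r => q (PySem.List.pyGetD grid r []))).all id := by
    simp [List.all_map]
  rw [h1, map_rowAt grid q]
  simp [List.all_map]

-- len(set(row)) == 1 is B's "nonempty constant row" test
theorem setlen_one_iff (row : List Int) :
    (PySem.Set.ofList row).length = 1 ↔ pvMonoRowB row = true := by
  cases row with
  | nil => simp [PySem.Set.ofList_nil, pvMonoRowB]
  | cons a t =>
      rw [PySem.Set.ofList_cons]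
      simp only [List.length_cons, pvMonoRowB, List.isEmpty_cons, Bool.not_false, Bool.true_and,
        List.all_cons, List.headD_cons, beq_self_eq_true, Bool.true_and]
      constructor
      · intro h
        have hnil : PySem.Set.discard (PySem.Set.ofList t) a = [] := by
          cases hd : PySem.Set.discard (PySem.Set.ofList t) a with
          | nil => rfl
          | cons x xs => rw [hd] at h; simp at h
        rw [List.all_eq_true]
        intro v hv
        by_contra hne
        have : v ∈ PySem.Set.discard (PySem.Set.ofList t) a := by
          rw [PySem.Set.mem_discard]
          exact ⟨(PySem.Set.mem_ofList t v).mpr hv, by simpa using hne⟩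
        rw [hnil] at this; simp at this
      · intro h
        have hnil : PySem.Set.discard (PySem.Set.ofList t) a = [] := by
          rw [List.eq_nil_iff_forall_not_mem]
          intro x hx
          rw [PySem.Set.mem_discard, PySem.Set.mem_ofList] at hx
          rw [List.all_eq_true] at h
          exact hx.2 (by simpa using h x hx.1)
        rw [hnil]; rfl

theorem foldl_sepA_some (v : Int) : ∀ (l : List (List Int)),
    l.foldl (fun s row =>
      if (PySem.Set.ofList row).length = 1 then (if s.isNone then some (pvCell row 0) else s) else s)
      (some v) = some v := by
  intro l
  induction l with
  | nil => rfl
  | cons row rest ih =>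
      simp only [List.foldl_cons]
      split_ifs with h1 h2
      · simp at h2
      · exact ih
      · exact ih

theorem pvCell_zero (a : Int) (t : List Int) : pvCell (a :: t) 0 = a := by
  simp [pvCell, PySem.List.pyGetD, PySem.List.pyGet?, PySem.List.pyIdx?]

theorem sep_eq : ∀ (grid : List (List Int)), pvSepA grid = pvSepB grid := by
  intro grid
  induction grid with
  | nil => rfl
  | cons row rest ih =>
      simp only [pvSepA, pvSepB, List.foldl_cons, List.find?_cons]
      cases hm : pvMonoRowB row with
      | true =>
          rw [if_pos ((setlen_one_iff row).mpr hm), if_pos (show (none : Option Int).isNone = true from rfl), foldl_sepA_some]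
          cases row with
          | nil => simp [pvMonoRowB] at hm
          | cons a t => rw [pvCell_zero]; rfl
      | false =>
          rw [if_neg (by rw [setlen_one_iff]; simp [hm])]
          exact ih

-- pvMinRun flags = min over the run-length gaps
theorem minrun_eq (flags : List Bool) :
    pvMinRun flags = ((pvGapsRL 0 flags).foldl pvUpd none).getD 1 :=
  congrArg (fun o => o.getD 1) (minrun_fold flags none 0)

theorem minh_eq (grid : List (List Int)) (sep : Option Int) :
    (PySem.List.min? (pvGaps (pvSepRowsA grid sep)) (fun x => x)).getD 1
      = pvMinRun (pvRowFlagsB grid sep) := by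
  have hflags : (PySem.List.pyRange 0 (grid.length : Int) 1).map
      (fun r => pvIsSepRowA grid sep (pvColsOf grid) r) = pvRowFlagsB grid sep := by
    unfold pvIsSepRowA pvRowFlagsB pvRowAt
    exact map_rowAt grid
      (fun row => (PySem.List.pyRange 0 (pvColsOf grid) 1).all (fun c => some (pvCell row c) == sep))
  have hsr : pvSepRowsA grid sep
      = (-1) :: pvTrueIdxs 0 (pvRowFlagsB grid sep) ++ [(grid.length : Int)] := by
    unfold pvSepRowsA
    rw [show (PySem.List.pyRange 0 (grid.length : Int) 1)
        = PySem.List.pyRange 0 (0 + (grid.length : Int)) 1 by rw [zero_add]]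
    rw [filter_pyRange_eq_trueIdxs _ grid.length 0]
    rw [show PySem.List.pyRange 0 (0 + (grid.length : Int)) 1
        = PySem.List.pyRange 0 (grid.length : Int) 1 by rw [zero_add]]
    rw [hflags]
    rfl
  rw [hsr, gaps_trueIdxs (pvRowFlagsB grid sep) 0 0 (-1) (grid.length : Int) (le_refl 0)
    (by ring) (by simp [pvRowFlagsB])]
  rw [← foldl_pvUpd_min? _ (fun x hx => pvGapsRL_pos _ 0 x hx), minrun_eq]

theorem minw_eq (grid : List (List Int)) (sep : Option Int) :
    (PySem.List.min? (pvGaps (pvSepColsA grid sep)) (fun x => x)).getD 1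
      = pvMinRun (pvColFlagsB grid sep) := by
  have hpred : (fun c => pvIsSepColA grid sep c)
      = (fun c => grid.all (fun row => some (pvCell row c) == sep)) := by
    funext c
    unfold pvIsSepColA pvRowAt
    exact all_rowAt grid (fun row => some (pvCell row c) == sep)
  have hflags : (PySem.List.pyRange 0 (pvColsOf grid) 1).map (fun c => pvIsSepColA grid sep c)
      = pvColFlagsB grid sep := by
    rw [hpred]; rfl
  have hc0 : (0 : Int) ≤ pvColsOf grid := by unfold pvColsOf; positivity
  have hlen : ((pvColFlagsB grid sep).length : Int) = pvColsOf grid := by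
    unfold pvColFlagsB
    rw [List.length_map, PySem.List.length_pyRange_one]
    omega
  have hsc : pvSepColsA grid sep
      = (-1) :: pvTrueIdxs 0 (pvColFlagsB grid sep) ++ [pvColsOf grid] := by
    unfold pvSepColsA
    rw [show (PySem.List.pyRange 0 (pvColsOf grid) 1)
        = PySem.List.pyRange 0 (0 + pvColsOf grid) 1 by rw [zero_add]]
    rw [show pvColsOf grid = ((pvColsOf grid).toNat : Int) by omega]
    rw [filter_pyRange_eq_trueIdxs _ (pvColsOf grid).toNat 0]
    rw [show ((0 : Int) + ((pvColsOf grid).toNat : Int)) = pvColsOf grid by omega]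
    rw [hflags]
    rfl
  rw [hsc, gaps_trueIdxs (pvColFlagsB grid sep) 0 0 (-1) (pvColsOf grid) (le_refl 0)
    (by ring) (by omega)]
  rw [← foldl_pvUpd_min? _ (fun x hx => pvGapsRL_pos _ 0 x hx), minrun_eq]

theorem ports_eq (grid : List (List Int)) : solve_1190e5a7 grid = solve_1190e5a7_alt grid := by
  show List.replicate ((PySem.List.min? (pvGaps (pvSepRowsA grid (pvSepA grid))) (fun x => x)).getD 1).toNat
        (List.replicate ((PySem.List.min? (pvGaps (pvSepColsA grid (pvSepA grid))) (fun x => x)).getD 1).toNat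
          ((pvBgScan (pvColsOf grid) (pvSepA grid) grid).getD 0))
      = List.replicate (pvMinRun (pvRowFlagsB grid (pvSepB grid))).toNat
          (List.replicate (pvMinRun (pvColFlagsB grid (pvSepB grid))).toNat
            ((pvBgScan (pvColsOf grid) (pvSepB grid) grid).getD 0))
  rw [sep_eq, minh_eq, minw_eq]

-- ===== VERDICT (by name: the statement is the Claim_ definition above) =====
theorem solve_1190e5a7_spec : Claim_equal_solve_1190e5a7 := by
  intro grid _ _
  unfold Spec_solve_1190e5a7
  exact ports_eq grid
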